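-- pv_equiv track=rewrite | github.com/MiikaVuorio/SVP_algorithms | main.py | choose_reps
-- ===== SOURCE A (Python) =====
-- def choose_reps(centre_dic, min_num_vectors):
--     reps = []
--     saved_from_execution = []
--     marked_for_execution = []
--
--     for i in centre_dic.keys():
--         if len(centre_dic[i]) != 0:
--             index = len(centre_dic[i]) // 2
--             reps.append(centre_dic[i][index])
--             centre_dic[i].pop(index)
--             if len(centre_dic[i]) == 0:
--                 saved_from_execution.append(i)
--     for i in centre_dic.keys():
--         if len(centre_dic[i]) == 0 and i not in saved_from_execution:
--             marked_for_execution.append(i)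
--     for identity in marked_for_execution:
--         del centre_dic[identity]
--
--     # if len([item for subl in centre_dic.values() for item in subl]) < min_num_vectors:
--     #     raise Exception("not enough vectors")
--
--     # reps has to be less than half of total, maybe add this check
--
--     return centre_dic, reps
-- ===== SOURCE B (Python) =====
-- def choose_reps(centre_dic, min_num_vectors):
--     # Functional rebuild: reps are the medians of the non-empty buckets, and the
--     # returned dict is built fresh by comprehension -- each non-empty bucket with
--     # its median sliced out, originally-empty buckets dropped. (A mutates
--     # centre_dic in place; B does not -- equal return value, no mutation.)
--     reps = [b[len(b) // 2] for b in centre_dic.values() if b]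
--     kept = {k: b[:len(b) // 2] + b[len(b) // 2 + 1:] for k, b in centre_dic.items() if b}
--     return kept, reps
-- ===== Notes on version B (the rewrite author's own statement) =====
-- stated objective: simpler
-- what changed: B abandons A's in-place mutation (pop, saved_from_execution bookkeeping, second key scan, deletion loop) and instead builds the result functionally: one comprehension collects the medians and one dict comprehension rebuilds the kept buckets with the median sliced out, dropping originally-empty buckets; return value is identical but B does not mutate centre_dic.
import Mathlib
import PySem

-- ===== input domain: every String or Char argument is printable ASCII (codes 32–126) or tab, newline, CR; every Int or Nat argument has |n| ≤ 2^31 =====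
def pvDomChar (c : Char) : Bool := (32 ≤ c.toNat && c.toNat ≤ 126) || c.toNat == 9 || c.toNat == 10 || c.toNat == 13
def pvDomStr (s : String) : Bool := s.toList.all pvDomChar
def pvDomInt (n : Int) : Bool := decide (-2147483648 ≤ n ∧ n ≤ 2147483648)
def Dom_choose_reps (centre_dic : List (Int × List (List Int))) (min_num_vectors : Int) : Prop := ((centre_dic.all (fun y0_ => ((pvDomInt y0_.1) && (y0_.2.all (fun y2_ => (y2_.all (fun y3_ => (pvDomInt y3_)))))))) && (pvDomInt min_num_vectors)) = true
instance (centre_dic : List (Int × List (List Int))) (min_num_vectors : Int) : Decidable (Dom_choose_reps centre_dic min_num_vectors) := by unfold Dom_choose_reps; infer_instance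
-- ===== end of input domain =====

-- B rebuilds the result functionally (two comprehensions with slicing) instead of A's
-- in-place pop/bookkeeping/second-scan/delete machinery: simpler. A mutates centre_dic
-- in place (pop / del) while B does not; the equivalence proved is about the RETURN value.

-- ===== PORT A =====
-- `del centre_dic[i]`: removes the entry with key i (keys of a dict are unique, see Pre_).
def pyDel (d : List (Int × List (List Int))) (i : Int) : List (Int × List (List Int)) :=
  d.filter (fun q => q.1 != i)

-- first loop body: pop the median of a non-empty bucket into reps, record keys whose bucket
-- became empty; the `none` branch is unreachable (len//2 < len for a non-empty bucket).
def stepA (acc : List (Int × List (List Int)) × List (List Int) × List Int)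
    (p : Int × List (List Int)) : List (Int × List (List Int)) × List (List Int) × List Int :=
  if p.2.length ≠ 0 then
    match PySem.List.pop? p.2 ((p.2.length / 2 : Nat) : Int) with
    | some (x, v') =>
        (acc.1 ++ [(p.1, v')], acc.2.1 ++ [x],
         if v'.length = 0 then acc.2.2 ++ [p.1] else acc.2.2)
    | none => (acc.1 ++ [(p.1, p.2)], acc.2.1, acc.2.2)
  else (acc.1 ++ [(p.1, p.2)], acc.2.1, acc.2.2)

def choose_reps (centre_dic : List (Int × List (List Int))) (min_num_vectors : Int) :
    (List (Int × List (List Int))) × List (List Int) :=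
  let s := centre_dic.foldl stepA ([], [], [])
  let marked := s.1.foldl
    (fun m q => if q.2.length == 0 && !(s.2.2.contains q.1) then m ++ [q.1] else m) []
  (marked.foldl pyDel s.1, s.2.1)

-- ===== PORT B =====
def choose_reps_alt (centre_dic : List (Int × List (List Int))) (min_num_vectors : Int) :
    (List (Int × List (List Int))) × List (List Int) :=
  -- reps = [b[len(b) // 2] for b in centre_dic.values() if b]
  -- (the index len//2 is in range for a non-empty b, so pyGet? is some; .getD [] only
  -- realises that)
  let reps := (centre_dic.filter (fun p => p.2.length != 0)).map
    (fun p => (PySem.List.pyGet? p.2 ((p.2.length / 2 : Nat) : Int)).getD [])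
  -- kept = {k: b[:len(b) // 2] + b[len(b) // 2 + 1:] for k, b in centre_dic.items() if b}
  let kept := (centre_dic.filter (fun p => p.2.length != 0)).map
    (fun p => (p.1, PySem.List.slice p.2 none (some ((p.2.length / 2 : Nat) : Int)) ++
                    PySem.List.slice p.2 (some ((p.2.length / 2 + 1 : Nat) : Int)) none))
  (kept, reps)

-- ===== PRECONDITION & SPEC =====
-- centre_dic is a Python dict, so its keys are necessarily pairwise distinct; duplicate-key
-- association lists represent no dict input, hence no input A is ever called on is excluded.
def Pre_choose_reps (centre_dic : List (Int × List (List Int))) (min_num_vectors : Int) : Prop :=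
  (centre_dic.map (·.1)).Nodup
instance (centre_dic : List (Int × List (List Int))) (min_num_vectors : Int) : Decidable (Pre_choose_reps centre_dic min_num_vectors) := by unfold Pre_choose_reps; infer_instance

def pvWitness_choose_reps : (List (Int × List (List Int))) × Int :=
  ([(0, [[1], [2, 3], [4]]), (1, []), (2, [[5]])], 0)

def Spec_choose_reps (centre_dic : List (Int × List (List Int))) (min_num_vectors : Int) (out : (List (Int × List (List Int))) × List (List Int)) : Prop := out = choose_reps_alt centre_dic min_num_vectors
instance (centre_dic : List (Int × List (List Int))) (min_num_vectors : Int) (out : (List (Int × List (List Int))) × List (List Int)) : Decidable (Spec_choose_reps centre_dic min_num_vectors out) := by unfold Spec_choose_reps; infer_instance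

-- ===== CLAIM (what is proved, stated in full; the proofs are below) =====
def Claim_equal_choose_reps : Prop := ∀ (centre_dic : List (Int × List (List Int))) (min_num_vectors : Int), Dom_choose_reps centre_dic min_num_vectors → Pre_choose_reps centre_dic min_num_vectors → Spec_choose_reps centre_dic min_num_vectors (choose_reps centre_dic min_num_vectors)

-- ===== LEMMAS AND PROOFS =====

-- the value each bucket holds after A's first loop
def procEntry (p : Int × List (List Int)) : Int × List (List Int) :=
  (p.1, if p.2.length = 0 then p.2 else p.2.eraseIdx (p.2.length / 2))

lemma stepA_eq (acc : List (Int × List (List Int)) × List (List Int) × List Int)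
    (p : Int × List (List Int)) :
    stepA acc p =
      (acc.1 ++ [procEntry p],
       if p.2.length ≠ 0 then acc.2.1 ++ [p.2.getD (p.2.length / 2) []] else acc.2.1,
       if p.2.length = 1 then acc.2.2 ++ [p.1] else acc.2.2) := by
  unfold stepA procEntry
  by_cases h : p.2.length = 0
  · simp [h]
  · have hlt : p.2.length / 2 < p.2.length := Nat.div_lt_self (by omega) (by omega)
    rw [PySem.List.pop?_natCast p.2 (p.2.length / 2) hlt]
    simp only [h, if_neg h, ne_eq, not_false_eq_true, if_true]
    rw [List.getD_eq_getElem _ _ hlt]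
    have hl : (p.2.eraseIdx (p.2.length / 2)).length = p.2.length - 1 :=
      List.length_eraseIdx_of_lt hlt
    by_cases h1 : p.2.length = 1 <;> simp [hl, h1] <;> omega

lemma foldA_spec (l : List (Int × List (List Int)))
    (d : List (Int × List (List Int))) (r : List (List Int)) (s : List Int) :
    l.foldl stepA (d, r, s) =
      (d ++ l.map procEntry,
       r ++ (l.filter (fun p => p.2.length != 0)).map (fun p => p.2.getD (p.2.length / 2) []),
       s ++ (l.filter (fun p => p.2.length == 1)).map (·.1)) := by
  induction l generalizing d r s with
  | nil => simp
  | cons p l ih =>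
    simp only [List.foldl_cons, stepA_eq, ih, List.filter_cons, List.map_cons]
    by_cases h0 : p.2.length = 0 <;> by_cases h1 : p.2.length = 1 <;>
      simp [h0, h1]

-- A's second scan, with distinct keys, selects exactly the originally-empty buckets
lemma marked_eq (l : List (Int × List (List Int)))
    (hnd : (l.map (·.1)).Nodup) :
    ((l.map procEntry).foldl
        (fun m q => if q.2.length == 0 &&
            !(((l.filter (fun p => p.2.length == 1)).map (·.1)).contains q.1)
          then m ++ [q.1] else m) []) =
      (l.filter (fun p => p.2.length == 0)).map (·.1) := by
  rw [PySem.List.foldl_append_if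
      (fun q => q.2.length == 0 &&
        !(((l.filter (fun p => p.2.length == 1)).map (·.1)).contains q.1)) (·.1)
      (l.map procEntry) []]
  rw [List.filter_map, List.map_map]
  have hinj := List.inj_on_of_nodup_map hnd
  rw [List.filter_congr (q := fun p => p.2.length == 0)]
  · simp [procEntry]
  · intro p hp
    have hmem : p.1 ∈ (l.filter (fun q => q.2.length == 1)).map (·.1) ↔ p.2.length = 1 := by
      constructor
      · intro h
        obtain ⟨q, hq, hq1⟩ := List.mem_map.mp h
        have hq' := List.mem_filter.mp hq
        have : q = p := hinj hq'.1 hp hq1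
        subst this
        simpa using hq'.2
      · intro h
        exact List.mem_map.mpr ⟨p, List.mem_filter.mpr ⟨hp, by simpa using h⟩, rfl⟩
    simp only [Function.comp, procEntry]
    by_cases h0 : p.2.length = 0
    · have : p.1 ∉ (l.filter (fun q => q.2.length == 1)).map (·.1) := by
        rw [hmem]; omega
      simp [h0, this]
    · have hlt : p.2.length / 2 < p.2.length := Nat.div_lt_self (by omega) (by omega)
      have hl : (p.2.eraseIdx (p.2.length / 2)).length = p.2.length - 1 :=
        List.length_eraseIdx_of_lt hlt
      by_cases h1 : p.2.length = 1
      · have : p.1 ∈ (l.filter (fun q => q.2.length == 1)).map (·.1) := hmem.mpr h1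
        simp [h1, this]
      · simp only [if_neg h0, hl]
        have e1 : (p.2.length - 1 == 0) = false := by
          simp; omega
        simp [e1, h0]

-- folding pyDel over a key list filters out all entries with a key in that list
lemma foldl_pyDel (K : List Int) (L : List (Int × List (List Int))) :
    K.foldl pyDel L = L.filter (fun q => !(K.contains q.1)) := by
  induction K generalizing L with
  | nil => simp
  | cons i K ih =>
    simp only [List.foldl_cons, ih, pyDel, List.filter_filter]
    apply List.filter_congr
    intro q _
    by_cases h : q.1 = i <;> by_cases h2 : q.1 ∈ K <;> simp [h, h2]

-- ===== VERDICT (by name: the statement is the Claim_ definition above) =====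
theorem choose_reps_spec : Claim_equal_choose_reps := by
  intro centre_dic min_num_vectors _ hpre
  unfold Spec_choose_reps choose_reps choose_reps_alt
  simp only [foldA_spec, List.nil_append]
  rw [marked_eq centre_dic hpre, foldl_pyDel]
  have hinj := List.inj_on_of_nodup_map hpre
  simp only [Prod.mk.injEq]
  constructor
  · -- the returned dict
    rw [List.filter_map]
    rw [List.filter_congr (q := fun p => p.2.length != 0) (fun p hp => by
      have hmem : p.1 ∈ (centre_dic.filter (fun q => q.2.length == 0)).map (·.1) ↔
          p.2.length = 0 := by
        constructor
        · intro h
          obtain ⟨q, hq, hq1⟩ := List.mem_map.mp h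
          have hq' := List.mem_filter.mp hq
          have : q = p := hinj hq'.1 hp hq1
          subst this; simpa using hq'.2
        · intro h
          exact List.mem_map.mpr ⟨p, List.mem_filter.mpr ⟨hp, by simpa using h⟩, rfl⟩
      by_cases h0 : p.2.length = 0
      · have hc : ((centre_dic.filter (fun q => q.2.length == 0)).map (·.1)).contains p.1
            = true := List.contains_iff_mem.mpr (hmem.mpr h0)
        have hfst : (procEntry p).1 = p.1 := rfl
        simp only [Function.comp_apply, hfst, hc, h0]
        simp
      · have hn : p.1 ∉ (centre_dic.filter (fun q => q.2.length == 0)).map (·.1) := by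
          rw [hmem]; exact h0
        have hc : ((centre_dic.filter (fun q => q.2.length == 0)).map (·.1)).contains p.1
            = false := by simp [hn]
        have hfst : (procEntry p).1 = p.1 := rfl
        simp only [Function.comp_apply, hfst, hc]
        simp [h0])]
    apply List.map_congr_left
    intro p hp
    have h0 : p.2.length ≠ 0 := by
      have := (List.mem_filter.mp hp).2; simpa using this
    have hlt : p.2.length / 2 < p.2.length := Nat.div_lt_self (by omega) (by omega)
    simp only [Function.comp, procEntry, if_neg h0]
    rw [PySem.List.slice_to_natCast, PySem.List.slice_from_natCast,
      List.eraseIdx_eq_take_drop_succ]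
  · -- reps
    apply List.map_congr_left
    intro p hp
    have h0 : p.2.length ≠ 0 := by
      have := (List.mem_filter.mp hp).2; simpa using this
    have hlt : p.2.length / 2 < p.2.length := Nat.div_lt_self (by omega) (by omega)
    rw [PySem.List.pyGet?_natCast, List.getElem?_eq_getElem hlt,
      List.getD_eq_getElem _ _ hlt]
    rfl
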